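-- pv_equiv track=rewrite | github.com/h-joo/leetcodestudy | study0/solutions/week3/evaluate_the_bracket_pairs_of_a_string.py | evaluate
-- ===== SOURCE A (Python) =====
-- from typing import List
--
-- def evaluate(s: str, knowledge: List[List[str]]) -> str:
--     knowledge_mapping = dict(knowledge)
--
--     construct_string = ''
--     intermediate = ''
--     for char in s:
--         if char == '(':
--             construct_string += intermediate
--             intermediate = ''
--             continue
--
--         if char == ')':
--             construct_string += knowledge_mapping.get(intermediate, '?')
--             intermediate = ''
--             continue
--
--         intermediate += char
--     construct_string += intermediate
--
--     return construct_string
-- ===== SOURCE B (Python) =====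
-- from typing import List
--
-- def evaluate(s: str, knowledge: List[List[str]]) -> str:
--     mapping = dict(knowledge)
--     parts = s.split(')')
--     out = []
--     for j, part in enumerate(parts):
--         pieces = part.split('(')
--         out.extend(pieces[:-1])
--         if j < len(parts) - 1:
--             out.append(mapping.get(pieces[-1], '?'))
--         else:
--             out.append(pieces[-1])
--     return ''.join(out)
-- ===== Notes on version B (the rewrite author's own statement) =====
-- stated objective: alternative
-- what changed: B replaces A's single character-by-character state machine (accumulating an 'intermediate' buffer per char) by split-then-scan: split the string on ')' once, split each part on '(', emit inner pieces literally and look up only each part's final piece; Pre_ excludes only knowledge lists with an inner list of length != 2, on which dict(knowledge) raises ValueError in both A and B.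
import Mathlib
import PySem

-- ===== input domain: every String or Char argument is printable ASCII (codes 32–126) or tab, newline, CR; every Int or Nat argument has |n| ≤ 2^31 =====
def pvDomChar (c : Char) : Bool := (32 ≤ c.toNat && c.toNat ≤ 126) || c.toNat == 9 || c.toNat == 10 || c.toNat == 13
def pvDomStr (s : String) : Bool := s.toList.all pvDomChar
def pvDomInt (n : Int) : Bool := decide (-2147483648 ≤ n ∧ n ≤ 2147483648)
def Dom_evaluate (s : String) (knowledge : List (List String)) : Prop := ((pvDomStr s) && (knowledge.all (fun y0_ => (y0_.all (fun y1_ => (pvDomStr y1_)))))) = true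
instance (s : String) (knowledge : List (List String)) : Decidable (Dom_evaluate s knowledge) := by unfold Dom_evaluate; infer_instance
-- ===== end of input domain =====

-- B replaces A's char-by-char state machine by split-on-')' then split-each-part-on-'(';
-- equal on all inputs where dict(knowledge) does not raise (Pre_: inner lists of length 2).


-- ===== PORT A =====
-- dict(knowledge): insert each [k, v] pair in order (last wins).  Python's dict() raises
-- ValueError on an inner list of length ≠ 2 — those inputs are excluded by Pre_evaluate,
-- so the catch-all branch is never reached on admitted inputs.  (Shared by both ports,
-- exactly as both Pythons call dict(knowledge).)
def pvKnowledgeDict (knowledge : List (List String)) : PySem.Dict String String :=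
  knowledge.foldl (fun d kv =>
    match kv with
    | [k, v] => d.insert k v
    | _ => d) PySem.Dict.empty

-- A: one pass over the characters, state = (construct_string, intermediate) as char lists.
def evaluate (s : String) (knowledge : List (List String)) : String :=
  let m := pvKnowledgeDict knowledge
  let p := s.toList.foldl (fun (acc : List Char × List Char) ch =>
      if ch = '(' then (acc.1 ++ acc.2, [])
      else if ch = ')' then (acc.1 ++ (m.getD (String.ofList acc.2) "?").toList, [])
      else (acc.1, acc.2 ++ [ch])) ([], [])
  String.ofList (p.1 ++ p.2)

-- ===== PORT B =====
-- Source B's loop body over the parts of s.split(')'): pieces = part.split('('),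
-- emit pieces[:-1] literally; the last piece is looked up for every part but the final one.
def pvSegs (m : PySem.Dict String String) : List (List Char) → List Char
  | [] => []
  | [p] =>
      let pieces := p.splitOn '('
      pieces.dropLast.flatten ++ (pieces.getLast?.getD [])
  | p :: rest =>
      let pieces := p.splitOn '('
      pieces.dropLast.flatten ++ (m.getD (String.ofList (pieces.getLast?.getD [])) "?").toList
        ++ pvSegs m rest

-- s.split(')') ported as List.splitOn (exact for a one-character separator), then join.
def evaluate_alt (s : String) (knowledge : List (List String)) : String :=
  let m := pvKnowledgeDict knowledge
  String.ofList (pvSegs m (s.toList.splitOn ')'))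

-- ===== PRECONDITION & SPEC =====
-- Pre_ excludes exactly the inputs where dict(knowledge) raises ValueError in A
-- (an inner list whose length is not 2); B raises there too.
def Pre_evaluate (s : String) (knowledge : List (List String)) : Prop :=
  ∀ kv ∈ knowledge, kv.length = 2
instance (s : String) (knowledge : List (List String)) : Decidable (Pre_evaluate s knowledge) := by
  unfold Pre_evaluate; infer_instance

def pvWitness_evaluate : String × List (List String) := ("(name)is", [["name", "bob"]])

def Spec_evaluate (s : String) (knowledge : List (List String)) (out : String) : Prop := out = evaluate_alt s knowledge
instance (s : String) (knowledge : List (List String)) (out : String) : Decidable (Spec_evaluate s knowledge out) := by unfold Spec_evaluate; infer_instance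

-- ===== CLAIM (what is proved, stated in full; the proofs are below) =====
def Claim_equal_evaluate : Prop := ∀ (s : String) (knowledge : List (List String)), Dom_evaluate s knowledge → Pre_evaluate s knowledge → Spec_evaluate s knowledge (evaluate s knowledge)

-- ===== LEMMAS AND PROOFS =====

-- Proof-only characterisation of A's loop: pending buffer i, remaining characters cs.
def pvG (m : PySem.Dict String String) (i : List Char) : List Char → List Char
  | [] => i
  | c :: cs =>
      if c = '(' then i ++ pvG m [] cs
      else if c = ')' then (m.getD (String.ofList i) "?").toList ++ pvG m [] cs
      else pvG m (i ++ [c]) cs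

theorem pvFoldA (m : PySem.Dict String String) :
    ∀ (cs : List Char) (a i : List Char),
      (cs.foldl (fun (acc : List Char × List Char) ch =>
        if ch = '(' then (acc.1 ++ acc.2, [])
        else if ch = ')' then (acc.1 ++ (m.getD (String.ofList acc.2) "?").toList, [])
        else (acc.1, acc.2 ++ [ch])) (a, i)).1
      ++ (cs.foldl (fun (acc : List Char × List Char) ch =>
        if ch = '(' then (acc.1 ++ acc.2, [])
        else if ch = ')' then (acc.1 ++ (m.getD (String.ofList acc.2) "?").toList, [])
        else (acc.1, acc.2 ++ [ch])) (a, i)).2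
      = a ++ pvG m i cs := by
  intro cs
  induction cs with
  | nil => intro a i; simp [pvG]
  | cons c cs ih =>
      intro a i
      by_cases h1 : c = '('
      · simp [List.foldl_cons, h1, pvG, ih, List.append_assoc]
      · by_cases h2 : c = ')'
        · simp [List.foldl_cons, h2, pvG, ih, List.append_assoc]
        · simp [List.foldl_cons, h1, h2, pvG, ih]

theorem pvModifyHead_nil_append {α : Type} (l : List (List α)) :
    l.modifyHead (fun x => ([] : List α) ++ x) = l := by
  cases l <;> simp

theorem pvSplitOn_no_sep (i : List Char) (d : Char) (h : d ∉ i) :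
    i.splitOn d = [i] := by
  unfold List.splitOn
  apply List.splitOnP_eq_single
  intro x hx
  simp only [beq_iff_eq]
  intro he; exact h (he ▸ hx)

theorem pvSplitOn_append_sep (i p : List Char) (d : Char) (h : d ∉ i) :
    (i ++ d :: p).splitOn d = i :: p.splitOn d := by
  induction i with
  | nil => simp [List.splitOn, List.splitOnP_cons]
  | cons x xs ih =>
      have hx : x ≠ d := by intro he; exact h (by simp [he])
      have hxs : d ∉ xs := fun hm => h (by simp [hm])
      have := ih hxs
      simp only [List.cons_append, List.splitOn, List.splitOnP_cons, beq_iff_eq, hx,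
        if_false] at *
      rw [this]
      rfl

-- pvSegs on a cons with nonempty tail takes the "middle segment" branch.
theorem pvSegs_cons_of_ne_nil (m : PySem.Dict String String) (p : List Char)
    (rest : List (List Char)) (h : rest ≠ []) :
    pvSegs m (p :: rest) =
      (p.splitOn '(').dropLast.flatten
        ++ (m.getD (String.ofList ((p.splitOn '(').getLast?.getD [])) "?").toList
        ++ pvSegs m rest := by
  cases rest with
  | nil => exact absurd rfl h
  | cons r rs => rfl

-- Key invariant: A's remaining computation (pending buffer i, no '(' in i)
-- equals B's split-based rendering with i prepended to the first ')'-part.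
theorem pvG_eq_segs (m : PySem.Dict String String) :
    ∀ (cs i : List Char), '(' ∉ i →
      pvG m i cs = pvSegs m ((cs.splitOn ')').modifyHead (fun x => i ++ x)) := by
  intro cs
  induction cs with
  | nil =>
      intro i hi
      have h0 : ([] : List Char).splitOn ')' = [[]] := by
        simp [List.splitOn, List.splitOnP_nil]
      rw [h0]
      simp only [List.modifyHead_cons, List.append_nil]
      rw [show pvSegs m [i] = (i.splitOn '(').dropLast.flatten ++ ((i.splitOn '(').getLast?.getD []) from rfl]
      rw [pvSplitOn_no_sep i '(' hi]
      simp [pvG]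
  | cons c cs ih =>
      intro i hi
      have hne : cs.splitOn ')' ≠ [] := by
        unfold List.splitOn; exact List.splitOnP_ne_nil _ _
      obtain ⟨p, ps, hps⟩ : ∃ p ps, cs.splitOn ')' = p :: ps := by
        cases hq : cs.splitOn ')' with
        | nil => exact absurd hq hne
        | cons p ps => exact ⟨p, ps, rfl⟩
      have hcs0 : pvG m [] cs = pvSegs m (cs.splitOn ')') := by
        have := ih [] (by simp)
        rwa [pvModifyHead_nil_append] at this
      by_cases h2 : c = ')'
      · subst h2
        have hsplit : (')' :: cs).splitOn ')' = [] :: cs.splitOn ')' := by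
          simp [List.splitOn, List.splitOnP_cons]
        rw [hsplit]
        simp only [List.modifyHead_cons, List.append_nil]
        rw [pvSegs_cons_of_ne_nil m i _ (hps ▸ List.cons_ne_nil p ps)]
        rw [pvSplitOn_no_sep i '(' hi]
        simp [pvG, hcs0]
      · have hsplit : (c :: cs).splitOn ')' = (cs.splitOn ')').modifyHead (List.cons c) := by
          simp [List.splitOn, List.splitOnP_cons, h2]
        by_cases h1 : c = '('
        · subst h1
          rw [hsplit, hps]
          simp only [List.modifyHead_cons]
          have hfront : ((i ++ '(' :: p).splitOn '(') = i :: p.splitOn '(' :=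
            pvSplitOn_append_sep i p '(' hi
          obtain ⟨q, qs, hq⟩ : ∃ q qs, p.splitOn '(' = q :: qs := by
            cases hqq : p.splitOn '(' with
            | nil => exact absurd hqq (by unfold List.splitOn; exact List.splitOnP_ne_nil _ _)
            | cons q qs => exact ⟨q, qs, rfl⟩
          have hG : pvG m i ('(' :: cs) = i ++ pvSegs m (p :: ps) := by
            simp [pvG, hcs0, hps]
          rw [hG]
          cases ps with
          | nil =>
              rw [show pvSegs m [i ++ '(' :: p]
                    = ((i ++ '(' :: p).splitOn '(').dropLast.flatten
                      ++ (((i ++ '(' :: p).splitOn '(').getLast?.getD []) from rfl]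
              rw [show pvSegs m [p]
                    = (p.splitOn '(').dropLast.flatten ++ ((p.splitOn '(').getLast?.getD []) from rfl]
              rw [hfront, hq]
              simp [List.append_assoc]
          | cons r rs =>
              rw [pvSegs_cons_of_ne_nil m _ _ (List.cons_ne_nil r rs),
                  pvSegs_cons_of_ne_nil m _ _ (List.cons_ne_nil r rs)]
              rw [hfront, hq]
              simp [List.append_assoc]
        · -- ordinary character: it joins the pending buffer
          rw [hsplit, hps]
          simp only [List.modifyHead_cons]
          have hi' : '(' ∉ i ++ [c] := by
            intro hm
            rcases List.mem_append.mp hm with h | h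
            · exact hi h
            · simp at h; exact h1 h.symm
          have hrec := ih (i ++ [c]) hi'
          rw [hps] at hrec
          simp only [List.modifyHead_cons] at hrec
          simp [pvG, h1, h2, hrec, List.append_assoc]

-- ===== VERDICT (by name: the statement is the Claim_ definition above) =====
theorem evaluate_spec : Claim_equal_evaluate := by
  intro s knowledge _ _
  show evaluate s knowledge = evaluate_alt s knowledge
  simp only [evaluate, evaluate_alt]
  rw [pvFoldA (pvKnowledgeDict knowledge) s.toList [] []]
  have := pvG_eq_segs (pvKnowledgeDict knowledge) s.toList [] (by simp)
  rw [pvModifyHead_nil_append] at this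
  simp [this]
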